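-- pv_equiv track=rewrite | github.com/open-pulse/OpenPulse | pulse/interface/handler/pcf_handler.py | group_structures
-- ===== SOURCE A (Python) =====
-- from itertools import pairwise
--
-- def group_structures(lines_list):
--     structures_list = []
--     index_list = []
--     lines_list.append("")
--
--     for i, line in enumerate(lines_list):
--         if not line.startswith("    "):
--             index_list.append(i)
--
--     for a, b in pairwise(index_list):
--         structures_list.append(lines_list[a:b])
--
--     return structures_list
-- ===== SOURCE B (Python) =====
-- def group_structures(lines_list):
--     lines_list.append("")
--     groups = []
--     current = None
--     for line in lines_list:
--         if not line.startswith("    "):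
--             if current is not None:
--                 groups.append(current)
--             current = [line]
--         elif current is not None:
--             current.append(line)
--     return groups
-- ===== Notes on version B (the rewrite author's own statement) =====
-- stated objective: alternative
-- what changed: Replaces the two passes (collect header indices, then slice between consecutive index pairs) by a single accumulator pass that flushes the open group whenever a new non-indented header line is met; the trailing "" sentinel flushes the last group, so no final flush is needed.
import Mathlib
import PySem

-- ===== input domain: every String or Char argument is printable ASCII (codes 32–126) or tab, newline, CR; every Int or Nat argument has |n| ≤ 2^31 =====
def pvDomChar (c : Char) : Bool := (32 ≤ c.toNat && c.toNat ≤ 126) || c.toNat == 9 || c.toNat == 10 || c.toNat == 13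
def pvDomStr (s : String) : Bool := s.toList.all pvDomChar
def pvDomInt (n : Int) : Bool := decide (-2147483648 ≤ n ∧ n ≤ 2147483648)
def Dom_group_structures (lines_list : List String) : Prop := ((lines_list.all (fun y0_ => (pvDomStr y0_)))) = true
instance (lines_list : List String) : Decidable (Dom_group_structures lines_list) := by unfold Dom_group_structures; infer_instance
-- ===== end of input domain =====

-- B replaces A's two passes (header indices, then pairwise slices) by one pass that flushes
-- the open group at each header; the trailing "" sentinel flushes the last group.
-- Both Pythons append "" to the argument in place; the equivalence proved is about the return value.

-- ===== PORT A =====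
def group_structures (lines_list : List String) : List (List String) :=
  let structures_list : List (List String) := []
  let lines := lines_list ++ [""]
  let index_list : List Int :=
    (PySem.List.enumerate lines 0).foldl
      (fun acc p => if !(PySem.Str.startswith p.2 "    ") then acc ++ [p.1] else acc) []
  -- pairwise(index_list) = index_list.zip index_list.tail
  (index_list.zip index_list.tail).foldl
    (fun acc p => acc ++ [PySem.List.slice lines (some p.1) (some p.2)]) structures_list

-- ===== PORT B =====
def gsStep (st : List (List String) × Option (List String)) (line : String) :
    List (List String) × Option (List String) :=
  if !(PySem.Str.startswith line "    ") then
    ((match st.2 with | some c => st.1 ++ [c] | none => st.1), some [line])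
  else
    (st.1, st.2.map (fun c => c ++ [line]))

def group_structures_alt (lines_list : List String) : List (List String) :=
  ((lines_list ++ [""]).foldl gsStep ([], none)).1

-- ===== PRECONDITION & SPEC =====
def Spec_group_structures (lines_list : List String) (out : List (List String)) : Prop := out = group_structures_alt lines_list
instance (lines_list : List String) (out : List (List String)) : Decidable (Spec_group_structures lines_list out) := by unfold Spec_group_structures; infer_instance

-- ===== CLAIM (what is proved, stated in full; the proofs are below) =====
def Claim_equal_group_structures : Prop := ∀ (lines_list : List String), Dom_group_structures lines_list → Spec_group_structures lines_list (group_structures lines_list)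

-- ===== LEMMAS AND PROOFS =====

-- proof helpers (not referenced by the claim block)
def gsHdr (l : String) : Bool := !(PySem.Str.startswith l "    ")

def gsIdx (xs : List String) : List Int :=
  (PySem.List.enumerate xs 0).foldl
    (fun acc p => if !(PySem.Str.startswith p.2 "    ") then acc ++ [p.1] else acc) []

def gsA (xs : List String) : List (List String) :=
  ((gsIdx xs).zip (gsIdx xs).tail).foldl
    (fun acc p => acc ++ [PySem.List.slice xs (some p.1) (some p.2)]) []

theorem gsIdx_eq (xs : List String) :
    gsIdx xs = ((PySem.List.enumerate xs 0).filter (fun p => gsHdr p.2)).map (·.1) := by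
  simpa [gsIdx, gsHdr] using
    PySem.List.foldl_append_if (l := PySem.List.enumerate xs 0)
      (p := fun p => gsHdr p.2) (f := (·.1)) (acc := [])

theorem gsIdx_mem (xs : List String) {i : Int} (h : i ∈ gsIdx xs) :
    ∃ k : Nat, i = (k : Int) ∧ k < xs.length := by
  rw [gsIdx_eq] at h
  obtain ⟨p, hp, rfl⟩ := List.mem_map.1 h
  have hp' := List.mem_filter.1 hp
  obtain ⟨k, hk, hpe⟩ := (PySem.List.mem_enumerate_iff _ _ _).1 hp'.1
  exact ⟨k, by simp [hpe], hk⟩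

theorem gsIdx_append (xs : List String) (x : String) :
    gsIdx (xs ++ [x]) = gsIdx xs ++ (if gsHdr x then [(xs.length : Int)] else []) := by
  rw [gsIdx_eq, gsIdx_eq, PySem.List.enumerate_append, List.filter_append, List.map_append]
  congr 1
  have he : PySem.List.enumerate [x] ((0:Int) + xs.length) = [((xs.length : Int), x)] := by
    simp [PySem.List.enumerate]
  rw [he]
  cases hx : gsHdr x <;> simp [List.filter_cons, gsHdr] <;> simp [gsHdr] at hx <;> simp [hx]

theorem zip_tail_append (l : List Int) (n : Int) :
    (l ++ [n]).zip (l ++ [n]).tail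
      = l.zip l.tail ++ (match l.getLast? with | some a => [(a, n)] | none => []) := by
  induction l with
  | nil => simp
  | cons a t ih =>
      cases t with
      | nil => simp
      | cons b t' => simpa using ih

theorem slice_append_of_lt {α : Type} (xs ys : List α) (a b : Int)
    (ha : 0 ≤ a) (hb : 0 ≤ b) (hble : b.toNat ≤ xs.length) :
    PySem.List.slice (xs ++ ys) (some a) (some b) = PySem.List.slice xs (some a) (some b) := by
  rw [PySem.List.slice_toNat _ ha hb, PySem.List.slice_toNat _ ha hb]
  by_cases hax : a.toNat ≤ xs.length
  · rw [List.drop_append_of_le_length hax]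
    rw [List.take_append_of_le_length (by rw [List.length_drop]; omega)]
  · have h0 : b.toNat - a.toNat = 0 := by omega
    simp [h0]

-- the invariant of the single pass, proved by induction from the right
theorem gs_inv (xs : List String) :
    gsA xs = (xs.foldl gsStep ([], none)).1 ∧
    (match (gsIdx xs).getLast? with
      | none => (xs.foldl gsStep ([], none)).2 = none
      | some a => ∃ k : Nat, a = (k : Int) ∧ k < xs.length ∧
          (xs.foldl gsStep ([], none)).2 = some (xs.drop k)) := by
  induction xs using List.reverseRecOn with
  | nil => simp [gsA, gsIdx, PySem.List.enumerate]
  | append_singleton xs x ih =>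
      obtain ⟨ihA, ihC⟩ := ih
      have hfold : (xs ++ [x]).foldl gsStep ([], none) = gsStep (xs.foldl gsStep ([], none)) x := by
        simp
      have hAcongr : ((gsIdx xs).zip (gsIdx xs).tail).foldl
            (fun acc p => acc ++ [PySem.List.slice (xs ++ [x]) (some p.1) (some p.2)]) []
          = gsA xs := by
        unfold gsA
        refine PySem.List.foldl_congr_mem _ _ _ _ ?_
        intro acc p hp
        have h2 : p.2 ∈ gsIdx xs := by
          have := List.of_mem_zip hp
          exact List.mem_of_mem_tail this.2
        have h1 : p.1 ∈ gsIdx xs := (List.of_mem_zip hp).1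
        obtain ⟨k2, hk2, hk2lt⟩ := gsIdx_mem xs h2
        obtain ⟨k1, hk1, _⟩ := gsIdx_mem xs h1
        rw [slice_append_of_lt xs [x] p.1 p.2 (by omega) (by omega) (by omega)]
      by_cases hx : gsHdr x = true
      · -- header: flush
        have hidx : gsIdx (xs ++ [x]) = gsIdx xs ++ [(xs.length : Int)] := by
          rw [gsIdx_append]; simp [hx]
        constructor
        · rw [gsA, hidx, zip_tail_append]
          rw [List.foldl_append, hAcongr, hfold]
          cases hlast : (gsIdx xs).getLast? with
          | none =>
              rw [hlast] at ihC
              simp [gsHdr] at hx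
              simp [gsStep, hx, ihC, ihA]
          | some a =>
              rw [hlast] at ihC
              obtain ⟨k, rfl, hklt, hc⟩ := ihC
              have hslice : PySem.List.slice (xs ++ [x]) (some (k : Int)) (some (xs.length : Int))
                  = xs.drop k := by
                rw [PySem.List.slice_natCast]
                rw [List.drop_append_of_le_length (by omega)]
                rw [List.take_append_of_le_length (by simp)]
                simp
              simp only [List.foldl_cons, List.foldl_nil, hslice]
              simp [gsHdr] at hx
              simp [gsStep, hx, hc, ihA]
        · rw [hidx]
          simp only [List.getLast?_append, List.getLast?_singleton]
          refine ⟨xs.length, rfl, by simp, ?_⟩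
          rw [hfold]
          simp [gsHdr] at hx
          simp [gsStep, hx]
      · -- indented line
        have hidx : gsIdx (xs ++ [x]) = gsIdx xs := by rw [gsIdx_append]; simp [hx]
        have hstep : gsStep (xs.foldl gsStep ([], none)) x
            = ((xs.foldl gsStep ([], none)).1,
               (xs.foldl gsStep ([], none)).2.map (fun c => c ++ [x])) := by
          simp [gsHdr] at hx
          simp [gsStep, hx]
        constructor
        · rw [gsA, hidx, hAcongr, hfold, hstep, ihA]
        · rw [hidx, hfold, hstep]
          cases hlast : (gsIdx xs).getLast? with
          | none => rw [hlast] at ihC; simp [ihC]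
          | some a =>
              rw [hlast] at ihC
              obtain ⟨k, rfl, hklt, hc⟩ := ihC
              refine ⟨k, rfl, by simp; omega, ?_⟩
              rw [hc]
              simp [List.drop_append_of_le_length (le_of_lt hklt)]

-- ===== VERDICT (by name: the statement is the Claim_ definition above) =====
theorem group_structures_spec : Claim_equal_group_structures := by
  intro lines_list _
  show group_structures lines_list = group_structures_alt lines_list
  have h := (gs_inv (lines_list ++ [""])).1
  simpa [group_structures, group_structures_alt, gsA, gsIdx] using h
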